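-- pv_equiv track=rewrite | github.com/na-nnaaa/Nyarqui-2026-1 | Lab_1/coso.py | transformar_letra_entero
-- ===== SOURCE A (Python) =====
-- def transformar_letra_entero (char):
--     digitos = "0123456789ABCDEF"
--     entero = 0
--     for i in digitos:
--         if i == char:
--             return entero
--         entero += 1
--     return 0
-- ===== SOURCE B (Python) =====
-- def transformar_letra_entero(char):
--     # closed-form mapping from the character code instead of scanning a digit table
--     if isinstance(char, str) and len(char) == 1:
--         if '0' <= char <= '9':
--             return ord(char) - 48
--         if 'A' <= char <= 'F':
--             return ord(char) - 55
--     return 0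
-- ===== Notes on version B (the rewrite author's own statement) =====
-- stated objective: idiomatic
-- what changed: Replaces the index-counting scan over the hex digit table with a closed-form arithmetic mapping from the character code (ord-48 for decimal digits, ord-55 for A-F), guarded so all non-matching inputs yield 0 as in A.
import Mathlib
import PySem

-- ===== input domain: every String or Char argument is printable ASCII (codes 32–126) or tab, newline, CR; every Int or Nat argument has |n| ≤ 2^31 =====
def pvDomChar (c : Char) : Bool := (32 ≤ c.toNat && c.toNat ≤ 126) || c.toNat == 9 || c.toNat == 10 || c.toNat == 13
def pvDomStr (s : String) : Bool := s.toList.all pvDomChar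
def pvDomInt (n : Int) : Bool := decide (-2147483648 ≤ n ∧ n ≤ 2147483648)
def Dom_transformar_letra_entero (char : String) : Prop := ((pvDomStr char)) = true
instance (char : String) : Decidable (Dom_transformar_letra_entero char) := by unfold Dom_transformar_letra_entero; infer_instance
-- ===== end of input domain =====

-- B replaces A's index-counting scan of "0123456789ABCDEF" with a closed-form
-- arithmetic mapping from the character code (idiomatic; no speed claim).

-- ===== PORT A =====
-- the for-loop over the digit string, carrying the counter `entero`
def pvALoop (l : List Char) (entero : Int) (char : String) : Int :=
  match l with
  | [] => 0
  | i :: rest => if String.ofList [i] = char then entero else pvALoop rest (entero + 1) char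

def transformar_letra_entero (char : String) : Int :=
  pvALoop "0123456789ABCDEF".toList 0 char

-- ===== PORT B =====
def transformar_letra_entero_alt (char : String) : Int :=
  match char.toList with
  | [c] =>
    if '0' ≤ c ∧ c ≤ '9' then (c.toNat : Int) - 48
    else if 'A' ≤ c ∧ c ≤ 'F' then (c.toNat : Int) - 55
    else 0
  | _ => 0

-- ===== PRECONDITION & SPEC =====
def Spec_transformar_letra_entero (char : String) (out : Int) : Prop := out = transformar_letra_entero_alt char
instance (char : String) (out : Int) : Decidable (Spec_transformar_letra_entero char out) := by unfold Spec_transformar_letra_entero; infer_instance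

-- ===== CLAIM (what is proved, stated in full; the proofs are below) =====
def Claim_equal_transformar_letra_entero : Prop := ∀ (char : String), Dom_transformar_letra_entero char → Spec_transformar_letra_entero char (transformar_letra_entero char)

-- ===== LEMMAS AND PROOFS =====

-- A's loop never matches when `char` is not a one-character string
theorem pvALoop_ne_one (l : List Char) (k : Int) (char : String)
    (h : char.toList.length ≠ 1) : pvALoop l k char = 0 := by
  induction l generalizing k with
  | nil => rfl
  | cons i rest ih =>
    simp only [pvALoop]
    rw [if_neg, ih]
    intro he
    apply h
    rw [← he]
    simp

theorem mk_toList (s : String) : String.ofList s.toList = s := String.ofList_toList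

theorem single_case (c : Char) (h : c.toNat ≤ 126) :
    pvALoop "0123456789ABCDEF".toList 0 (String.ofList [c]) =
      transformar_letra_entero_alt (String.ofList [c]) := by
  rw [← Char.ofNat_toNat c]
  generalize c.toNat = n at h
  interval_cases n <;> decide

-- ===== VERDICT (by name: the statement is the Claim_ definition above) =====
theorem transformar_letra_entero_spec : Claim_equal_transformar_letra_entero := by
  intro char hdom
  unfold Spec_transformar_letra_entero transformar_letra_entero
  match hl : char.toList with
  | [] =>
    rw [← mk_toList char, hl]
    decide
  | [c] =>
    have hc : pvDomChar c = true := by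
      have := hdom
      unfold Dom_transformar_letra_entero pvDomStr at this
      rw [hl] at this
      simpa using this
    have hle : c.toNat ≤ 126 := by
      unfold pvDomChar at hc
      simp only [Bool.or_eq_true, Bool.and_eq_true, decide_eq_true_eq, beq_iff_eq] at hc
      omega
    rw [← mk_toList char, hl]
    exact single_case c hle
  | c1 :: c2 :: rest =>
    have h1 : char.toList.length ≠ 1 := by rw [hl]; simp
    rw [pvALoop_ne_one _ _ _ h1]
    unfold transformar_letra_entero_alt
    rw [hl]
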